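-- pv_equiv track=rewrite | github.com/Anders-E/Kattis | glitchbot/glitchbot.py | execute
-- ===== SOURCE A (Python) =====
-- from operator import add
--
-- def execute(instructions):
--     pos = (0, 0)
--     direction = (0, 1)
--
--     for instr in instructions:
--         if instr == "Left":
--             if direction == (0, 1):
--                 direction = (-1, 0)
--             elif direction == (1, 0):
--                 direction = (0, 1)
--             elif direction == (0, -1):
--                 direction = (1, 0)
--             elif direction == (-1, 0):
--                 direction = (0, -1)
--         if instr == "Right":
--             if direction == (0, 1):
--                 direction = (1, 0)
--             elif direction == (1, 0):
--                 direction = (0, -1)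
--             elif direction == (0, -1):
--                 direction = (-1, 0)
--             elif direction == (-1, 0):
--                 direction = (0, 1)
--         if instr == "Forward":
--             pos = tuple(map(add, pos, direction))
--
--     return pos
-- ===== SOURCE B (Python) =====
-- def execute(instructions):
--     # pass 1: heads[k] = net signed turn count ("Right" minus "Left") strictly before instruction k
--     heads = []
--     t = 0
--     for instr in instructions:
--         heads.append(t)
--         t += 1 if instr == "Right" else -1 if instr == "Left" else 0
--     # pass 2: each Forward contributes the clockwise unit vector of its prefix heading mod 4
--     DX = [0, 1, 0, -1]
--     DY = [1, 0, -1, 0]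
--     fwd = [h % 4 for instr, h in zip(instructions, heads) if instr == "Forward"]
--     return (sum(DX[h] for h in fwd), sum(DY[h] for h in fwd))
-- ===== Notes on version B (the rewrite author's own statement) =====
-- stated objective: alternative
-- what changed: Replaces A's one-pass (position, direction-tuple) state-machine simulation with two staged passes: a prefix-sum of signed turn counts, then a map/filter/sum over the Forward instructions of the unit vector indexed by that prefix count mod 4.
import Mathlib
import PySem

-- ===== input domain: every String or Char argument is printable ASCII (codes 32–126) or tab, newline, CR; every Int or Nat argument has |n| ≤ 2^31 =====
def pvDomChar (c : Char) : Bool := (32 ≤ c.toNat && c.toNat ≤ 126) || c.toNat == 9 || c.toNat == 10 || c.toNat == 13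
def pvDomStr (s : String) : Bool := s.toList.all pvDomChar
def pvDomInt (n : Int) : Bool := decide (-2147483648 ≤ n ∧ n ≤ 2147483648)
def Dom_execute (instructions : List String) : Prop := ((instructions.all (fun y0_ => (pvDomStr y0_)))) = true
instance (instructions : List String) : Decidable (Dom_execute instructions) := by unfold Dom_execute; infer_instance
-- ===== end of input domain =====

-- B replaces A's one-pass (position, direction) state-machine simulation with a prefix-sum of
-- signed turn counts followed by a map/filter/sum over the Forward instructions; objective: alternative.

-- ===== PORT A =====
-- one loop step of A: state is (pos, direction)
def pvStepA (s : (Int × Int) × (Int × Int)) (instr : String) : (Int × Int) × (Int × Int) :=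
  let pos := s.1
  let dir := s.2
  let dir :=
    if instr = "Left" then
      if dir = ((0 : Int), (1 : Int)) then (-1, 0)
      else if dir = (1, 0) then (0, 1)
      else if dir = (0, -1) then (1, 0)
      else if dir = (-1, 0) then (0, -1)
      else dir
    else dir
  let dir :=
    if instr = "Right" then
      if dir = ((0 : Int), (1 : Int)) then (1, 0)
      else if dir = (1, 0) then (0, -1)
      else if dir = (0, -1) then (-1, 0)
      else if dir = (-1, 0) then (0, 1)
      else dir
    else dir
  let pos := if instr = "Forward" then (pos.1 + dir.1, pos.2 + dir.2) else pos
  (pos, dir)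

def execute (instructions : List String) : Int × Int :=
  (instructions.foldl pvStepA ((0, 0), (0, 1))).1

-- ===== PORT B =====
-- the signed turn contribution of one instruction (the conditional expression in pass 1)
def pvTurn (instr : String) : Int :=
  if instr = "Right" then 1 else if instr = "Left" then -1 else 0

-- pass 1: the append loop building heads (state: running count t, accumulated list)
def pvHeads (instructions : List String) : List Int :=
  (instructions.foldl (fun (s : Int × List Int) instr => (s.1 + pvTurn instr, s.2 ++ [s.1]))
    (0, [])).2

def pvDX : List Int := [0, 1, 0, -1]
def pvDY : List Int := [1, 0, -1, 0]

def execute_alt (instructions : List String) : Int × Int :=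
  let fwd := ((instructions.zip (pvHeads instructions)).filter (fun p => p.1 = "Forward")).map
    (fun p => PySem.Int.mod p.2 4)
  ((fwd.map (fun h => (PySem.List.pyGet? pvDX h).getD 0)).sum,
   (fwd.map (fun h => (PySem.List.pyGet? pvDY h).getD 0)).sum)

-- ===== PRECONDITION & SPEC =====
def Spec_execute (instructions : List String) (out : Int × Int) : Prop := out = execute_alt instructions
instance (instructions : List String) (out : Int × Int) : Decidable (Spec_execute instructions out) := by unfold Spec_execute; infer_instance

-- ===== CLAIM (what is proved, stated in full; the proofs are below) =====
def Claim_equal_execute : Prop := ∀ (instructions : List String), Dom_execute instructions → Spec_execute instructions (execute instructions)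

-- ===== LEMMAS AND PROOFS =====

-- heads list started at turn count t (the loop of pass 1, as structural recursion)
def pvHeadsFrom (t : Int) : List String → List Int
  | [] => []
  | instr :: rest => t :: pvHeadsFrom (t + pvTurn instr) rest

theorem pvHeads_foldl (l : List String) (t : Int) (acc : List Int) :
    (l.foldl (fun (s : Int × List Int) instr => (s.1 + pvTurn instr, s.2 ++ [s.1])) (t, acc)).2
      = acc ++ pvHeadsFrom t l := by
  induction l generalizing t acc with
  | nil => simp [pvHeadsFrom]
  | cons i rest ih => simp [pvHeadsFrom, ih]

-- the displacement contributed by l when entered with turn count t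
def pvDisp (t : Int) : List String → Int × Int
  | [] => (0, 0)
  | instr :: rest =>
    let r := pvDisp (t + pvTurn instr) rest
    if instr = "Forward" then
      (((PySem.List.pyGet? pvDX (PySem.Int.mod t 4)).getD 0) + r.1,
       ((PySem.List.pyGet? pvDY (PySem.Int.mod t 4)).getD 0) + r.2)
    else r

-- B computes pvDisp t from heads started at t (componentwise, with the two maps fused)
theorem pvB_dispX (l : List String) (t : Int) :
    (((l.zip (pvHeadsFrom t l)).filter (fun p => p.1 = "Forward")).map
        (fun p => (PySem.List.pyGet? pvDX (PySem.Int.mod p.2 4)).getD 0)).sum = (pvDisp t l).1 := by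
  induction l generalizing t with
  | nil => simp [pvHeadsFrom, pvDisp]
  | cons i rest ih =>
    have h := ih (t + pvTurn i)
    by_cases hf : i = "Forward" <;> simp_all [pvHeadsFrom, pvDisp]

theorem pvB_dispY (l : List String) (t : Int) :
    (((l.zip (pvHeadsFrom t l)).filter (fun p => p.1 = "Forward")).map
        (fun p => (PySem.List.pyGet? pvDY (PySem.Int.mod p.2 4)).getD 0)).sum = (pvDisp t l).2 := by
  induction l generalizing t with
  | nil => simp [pvHeadsFrom, pvDisp]
  | cons i rest ih =>
    have h := ih (t + pvTurn i)
    by_cases hf : i = "Forward" <;> simp_all [pvHeadsFrom, pvDisp]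

-- A's direction tuple as a function of the turn count
def pvDirOf (t : Int) : Int × Int :=
  ((PySem.List.pyGet? pvDX (PySem.Int.mod t 4)).getD 0,
   (PySem.List.pyGet? pvDY (PySem.Int.mod t 4)).getD 0)

theorem pvMod4_shift (t d : Int) : PySem.Int.mod (t + d) 4 = PySem.Int.mod (PySem.Int.mod t 4 + d) 4 := by
  have h1 := PySem.Int.floordiv_mul_add_mod t 4
  have h2 := PySem.Int.floordiv_mul_add_mod (t + d) 4
  have h3 := PySem.Int.floordiv_mul_add_mod (PySem.Int.mod t 4 + d) 4
  have b1 := PySem.Int.mod_nonneg (t + d) (b := 4) (by omega)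
  have b2 := PySem.Int.mod_lt (t + d) (b := 4) (by omega)
  have b3 := PySem.Int.mod_nonneg (PySem.Int.mod t 4 + d) (b := 4) (by omega)
  have b4 := PySem.Int.mod_lt (PySem.Int.mod t 4 + d) (b := 4) (by omega)
  omega

-- one A step from a state related to turn count t
theorem pvStepA_dir (t : Int) (pos : Int × Int) (instr : String) :
    pvStepA (pos, pvDirOf t) instr =
      ((if instr = "Forward" then (pos.1 + (pvDirOf t).1, pos.2 + (pvDirOf t).2) else pos),
       pvDirOf (t + pvTurn instr)) := by
  have hm0 := PySem.Int.mod_nonneg t (b := 4) (by omega)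
  have hm1 := PySem.Int.mod_lt t (b := 4) (by omega)
  have e1 := pvMod4_shift t 1
  have e2 := pvMod4_shift t (-1)
  have e3 := pvMod4_shift t 0
  by_cases hL : instr = "Left" <;> by_cases hR : instr = "Right" <;>
    by_cases hF : instr = "Forward" <;>
    simp_all only [pvDirOf, pvTurn, if_pos, if_neg, ite_false, not_false_eq_true]
  all_goals generalize hg : PySem.Int.mod t 4 = m at hm0 hm1 ⊢
  all_goals interval_cases m <;>
    simp_all [pvStepA, pvDX, pvDY, PySem.Int.mod, PySem.List.pyGet?,
      PySem.List.pyIdx?]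

-- A's fold equals pos + displacement
theorem pvFoldA (l : List String) (pos : Int × Int) (t : Int) :
    (l.foldl pvStepA (pos, pvDirOf t)).1 = (pos.1 + (pvDisp t l).1, pos.2 + (pvDisp t l).2) := by
  induction l generalizing pos t with
  | nil => simp [pvDisp]
  | cons i rest ih =>
    simp only [List.foldl_cons, pvStepA_dir t pos i]
    rw [ih]
    by_cases hf : i = "Forward" <;> simp [pvDisp, pvDirOf, hf] <;> constructor <;> ring

-- ===== VERDICT (by name: the statement is the Claim_ definition above) =====
theorem execute_spec : Claim_equal_execute := by
  intro instructions _
  show execute instructions = execute_alt instructions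
  unfold execute execute_alt
  rw [show pvHeads instructions = pvHeadsFrom 0 instructions from by
        simpa using pvHeads_foldl instructions 0 []]
  simp only [List.map_map]
  have hx := pvB_dispX instructions 0
  have hy := pvB_dispY instructions 0
  simp only [Function.comp_def] at hx hy ⊢
  rw [hx, hy]
  have h0 : pvDirOf 0 = (0, 1) := by decide
  rw [← h0, pvFoldA instructions (0, 0) 0]
  simp
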